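-- pv_equiv track=rewrite | github.com/vavilala-bhavana618/github-actions | tweaked.py | get_deployment_count_per_environment
-- ===== SOURCE A (Python) =====
-- def get_deployment_count_per_environment(jobs):
--     deployment_counts = {
--         'Dev': 0,
--         'Prod': 0,
--         'QA': 0
--     }
--
--     for job_step in jobs:
--         job_name = job_step['Job Name']
--         if 'Deploy-to-Dev' in job_name and job_step['Job Conclusion'] == 'success':
--             deployment_counts['Dev'] += 1
--         elif 'Deploy to Prod' in job_name and job_step['Job Conclusion'] == 'success':
--             deployment_counts['Prod'] += 1
--         elif 'Deploy to QA' in job_name and job_step['Job Conclusion'] == 'success':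
--             deployment_counts['QA'] += 1
--
--     return deployment_counts
-- ===== SOURCE B (Python) =====
-- def get_deployment_count_per_environment(jobs):
--     env_table = (('Deploy-to-Dev', 'Dev'), ('Deploy to Prod', 'Prod'), ('Deploy to QA', 'QA'))
--
--     def env_of(job_name):
--         for pattern, env in env_table:
--             if pattern in job_name:
--                 return env
--         return None
--
--     return {env: sum(1 for job in jobs
--                      if env_of(job['Job Name']) == env
--                      and job['Job Conclusion'] == 'success')
--             for env in ('Dev', 'Prod', 'QA')}
-- ===== Notes on version B (the rewrite author's own statement) =====
-- stated objective: alternative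
-- what changed: Replaces the single if/elif mutation loop over a counts dict with a pattern->environment table and a dict comprehension that counts each environment's successful deployments in its own pass (classification by first matching pattern, then per-environment counting).
import Mathlib
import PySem

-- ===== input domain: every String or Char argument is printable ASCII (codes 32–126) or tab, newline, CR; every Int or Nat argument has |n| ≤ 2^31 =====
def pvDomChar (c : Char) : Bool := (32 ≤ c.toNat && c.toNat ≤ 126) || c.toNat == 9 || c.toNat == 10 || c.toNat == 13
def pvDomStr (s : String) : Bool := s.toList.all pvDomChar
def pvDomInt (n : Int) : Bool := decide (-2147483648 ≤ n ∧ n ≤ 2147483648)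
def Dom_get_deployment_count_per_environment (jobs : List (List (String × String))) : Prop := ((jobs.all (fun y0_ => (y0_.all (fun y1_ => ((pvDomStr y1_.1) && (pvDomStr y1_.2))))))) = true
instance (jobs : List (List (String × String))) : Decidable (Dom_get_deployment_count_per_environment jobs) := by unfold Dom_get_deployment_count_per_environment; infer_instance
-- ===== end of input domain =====

-- B replaces A's single if/elif mutation loop over a counts dict with a pattern→environment
-- table and per-environment counting passes (alternative decomposition, same cost).


-- ===== PORT A =====
-- one iteration of A's for-loop body (lookups via PySem.Dict on the job's association list;
-- under Pre_ the getD defaults are never the looked-up value)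
def pvStepA (d : PySem.Dict String Int) (job_step : List (String × String)) : PySem.Dict String Int :=
  let job_name := (PySem.Dict.mk job_step).getD "Job Name" ""
  if PySem.Str.isIn "Deploy-to-Dev" job_name && ((PySem.Dict.mk job_step).getD "Job Conclusion" "" == "success") then
    d.modify "Dev" 0 (· + 1)
  else if PySem.Str.isIn "Deploy to Prod" job_name && ((PySem.Dict.mk job_step).getD "Job Conclusion" "" == "success") then
    d.modify "Prod" 0 (· + 1)
  else if PySem.Str.isIn "Deploy to QA" job_name && ((PySem.Dict.mk job_step).getD "Job Conclusion" "" == "success") then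
    d.modify "QA" 0 (· + 1)
  else d

def get_deployment_count_per_environment (jobs : List (List (String × String))) : List (String × Int) :=
  (jobs.foldl pvStepA (PySem.Dict.mk [("Dev", 0), ("Prod", 0), ("QA", 0)])).items

-- ===== PORT B =====
def pvEnvTable : List (String × String) :=
  [("Deploy-to-Dev", "Dev"), ("Deploy to Prod", "Prod"), ("Deploy to QA", "QA")]

-- env_of: first table entry whose pattern occurs in the name (loop with early return)
def pvEnvOf (job_name : String) : Option String :=
  (pvEnvTable.find? (fun pe => PySem.Str.isIn pe.1 job_name)).map (·.2)

-- sum(1 for job in jobs if …)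
def pvCountFor (jobs : List (List (String × String))) (env : String) : Int :=
  jobs.foldl (fun acc job =>
    if pvEnvOf ((PySem.Dict.mk job).getD "Job Name" "") == some env &&
       ((PySem.Dict.mk job).getD "Job Conclusion" "" == "success") then acc + 1 else acc) 0

def get_deployment_count_per_environment_alt (jobs : List (List (String × String))) : List (String × Int) :=
  ["Dev", "Prod", "QA"].map (fun env => (env, pvCountFor jobs env))

-- ===== PRECONDITION & SPEC =====
-- Pre_ excludes exactly the inputs on which Python A raises KeyError: a job without a
-- 'Job Name' key, or a job whose name contains a deploy pattern but has no 'Job Conclusion' key.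
def Pre_get_deployment_count_per_environment (jobs : List (List (String × String))) : Prop :=
  ∀ job ∈ jobs,
    (PySem.Dict.mk job).contains "Job Name" = true ∧
    ((PySem.Str.isIn "Deploy-to-Dev" ((PySem.Dict.mk job).getD "Job Name" "") ||
      PySem.Str.isIn "Deploy to Prod" ((PySem.Dict.mk job).getD "Job Name" "") ||
      PySem.Str.isIn "Deploy to QA" ((PySem.Dict.mk job).getD "Job Name" "")) = true →
     (PySem.Dict.mk job).contains "Job Conclusion" = true)
instance (jobs : List (List (String × String))) : Decidable (Pre_get_deployment_count_per_environment jobs) := by unfold Pre_get_deployment_count_per_environment; infer_instance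

def pvWitness_get_deployment_count_per_environment : (List (List (String × String))) :=
  [[("Job Name", "Deploy-to-Dev (run 1)"), ("Job Conclusion", "success")],
   [("Job Name", "build")]]

def Spec_get_deployment_count_per_environment (jobs : List (List (String × String))) (out : List (String × Int)) : Prop := out = get_deployment_count_per_environment_alt jobs
instance (jobs : List (List (String × String))) (out : List (String × Int)) : Decidable (Spec_get_deployment_count_per_environment jobs out) := by unfold Spec_get_deployment_count_per_environment; infer_instance

-- ===== CLAIM (what is proved, stated in full; the proofs are below) =====
def Claim_equal_get_deployment_count_per_environment : Prop := ∀ (jobs : List (List (String × String))), Dom_get_deployment_count_per_environment jobs → Pre_get_deployment_count_per_environment jobs → Spec_get_deployment_count_per_environment jobs (get_deployment_count_per_environment jobs)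

-- ===== LEMMAS AND PROOFS =====

theorem pvWitness_ok :
    Dom_get_deployment_count_per_environment pvWitness_get_deployment_count_per_environment ∧
    Pre_get_deployment_count_per_environment pvWitness_get_deployment_count_per_environment := by
  decide

-- accumulator shift for B's counting fold
theorem pvCountFold_shift (g : List (String × String) → Bool) :
    ∀ (jobs : List (List (String × String))) (a : Int),
      jobs.foldl (fun acc job => if g job then acc + 1 else acc) a
        = a + jobs.foldl (fun acc job => if g job then acc + 1 else acc) 0 := by
  intro jobs
  induction jobs with
  | nil => intro a; simp
  | cons j rest ih =>
      intro a
      simp only [List.foldl_cons]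
      rw [ih (if g j then a + 1 else a), ih (if g j then (0:Int) + 1 else 0)]
      split <;> ring

theorem pvCountFor_cons (j : List (String × String)) (rest : List (List (String × String))) (env : String) :
    pvCountFor (j :: rest) env =
      (if pvEnvOf ((PySem.Dict.mk j).getD "Job Name" "") == some env &&
          ((PySem.Dict.mk j).getD "Job Conclusion" "" == "success") then 1 else 0) + pvCountFor rest env := by
  unfold pvCountFor
  simp only [List.foldl_cons]
  rw [pvCountFold_shift]
  split <;> simp

-- the main loop invariant: A's dict after the fold is the three counts of B
theorem pvMain :
    ∀ (jobs : List (List (String × String))) (d p q : Int),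
      (jobs.foldl pvStepA (PySem.Dict.mk [("Dev", d), ("Prod", p), ("QA", q)])).items
        = [("Dev", d + pvCountFor jobs "Dev"), ("Prod", p + pvCountFor jobs "Prod"), ("QA", q + pvCountFor jobs "QA")] := by
  intro jobs
  induction jobs with
  | nil => intro d p q; simp [pvCountFor]
  | cons j rest ih =>
      intro d p q
      simp only [List.foldl_cons]
      rw [pvCountFor_cons, pvCountFor_cons, pvCountFor_cons]
      have hstep : pvStepA (PySem.Dict.mk [("Dev", d), ("Prod", p), ("QA", q)]) j =
          PySem.Dict.mk [("Dev", d + (if pvEnvOf ((PySem.Dict.mk j).getD "Job Name" "") == some "Dev" && ((PySem.Dict.mk j).getD "Job Conclusion" "" == "success") then 1 else 0)),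
                         ("Prod", p + (if pvEnvOf ((PySem.Dict.mk j).getD "Job Name" "") == some "Prod" && ((PySem.Dict.mk j).getD "Job Conclusion" "" == "success") then 1 else 0)),
                         ("QA", q + (if pvEnvOf ((PySem.Dict.mk j).getD "Job Name" "") == some "QA" && ((PySem.Dict.mk j).getD "Job Conclusion" "" == "success") then 1 else 0))] := by
        unfold pvStepA pvEnvOf pvEnvTable
        cases h1 : PySem.Str.isIn "Deploy-to-Dev" ((PySem.Dict.mk j).getD "Job Name" "") <;>
        cases h2 : PySem.Str.isIn "Deploy to Prod" ((PySem.Dict.mk j).getD "Job Name" "") <;>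
        cases h3 : PySem.Str.isIn "Deploy to QA" ((PySem.Dict.mk j).getD "Job Name" "") <;>
        cases hc : ((PySem.Dict.mk j).getD "Job Conclusion" "" == "success") <;>
          simp only [PySem.Str.isIn] at h1 h2 h3 <;>
          simp [List.find?, PySem.Dict.modify, PySem.Dict.insert, PySem.Dict.contains,
                PySem.Dict.getD, PySem.Dict.get?] at h1 h2 h3 hc ⊢ <;>
          simp_all
      rw [hstep, ih]
      ring_nf

-- ===== VERDICT (by name: the statement is the Claim_ definition above) =====
theorem get_deployment_count_per_environment_spec : Claim_equal_get_deployment_count_per_environment := by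
  intro jobs _ _
  unfold Spec_get_deployment_count_per_environment get_deployment_count_per_environment
    get_deployment_count_per_environment_alt
  rw [pvMain]
  simp
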